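-- pv_equiv track=rewrite | github.com/borin98/Projetos_Em_Python_Curso_USP | OperacoesComString/FuncaoString.py | le_string
-- ===== SOURCE A (Python) =====
-- def le_string ( lista_de_string ) :
--
--     min = len( lista_de_string[0] )
--     posicao_min = 0
--
--     for i in range ( len ( lista_de_string ) ) :
--
--         if ( min > len ( lista_de_string[i] ) ) :
--
--             min = len( lista_de_string[i] )
--             posicao_min = i
--
--
--     return lista_de_string[ posicao_min ]
-- ===== SOURCE B (Python) =====
-- def le_string(lista_de_string):
--     return sorted(lista_de_string, key=len)[0]
-- ===== Notes on version B (the rewrite author's own statement) =====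
-- stated objective: idiomatic
-- what changed: Replaces the hand-written index-tracking min-scan loop with a stable sort by length and taking the first element; stability makes ties resolve to the earliest shortest string exactly as A's strict '>' update does.
import Mathlib
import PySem

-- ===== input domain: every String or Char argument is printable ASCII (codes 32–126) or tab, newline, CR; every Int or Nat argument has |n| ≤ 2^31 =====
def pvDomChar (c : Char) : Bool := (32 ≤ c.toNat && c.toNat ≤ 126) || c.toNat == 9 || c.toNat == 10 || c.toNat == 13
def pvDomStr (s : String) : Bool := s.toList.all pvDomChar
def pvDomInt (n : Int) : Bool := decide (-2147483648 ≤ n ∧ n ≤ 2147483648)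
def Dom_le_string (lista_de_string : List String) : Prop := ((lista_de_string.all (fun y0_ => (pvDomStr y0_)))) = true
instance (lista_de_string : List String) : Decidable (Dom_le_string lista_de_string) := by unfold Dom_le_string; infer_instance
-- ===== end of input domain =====

-- ===== PORT A =====
-- Port of A: index loop over range(len(xs)) tracking (min length, position of min).
-- pyGetD with default "" is only read at in-range indices (Pre_ excludes the empty list).
def le_string (lista_de_string : List String) : String :=
  let min0 : Int := PySem.Str.len (PySem.List.pyGetD lista_de_string 0 "")
  let st : Int × Int :=
    (PySem.List.pyRange 0 (PySem.List.len lista_de_string)).foldl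
      (fun (st : Int × Int) i =>
        if st.1 > PySem.Str.len (PySem.List.pyGetD lista_de_string i "") then
          (PySem.Str.len (PySem.List.pyGetD lista_de_string i ""), i)
        else st)
      (min0, 0)
  PySem.List.pyGetD lista_de_string st.2 ""

-- ===== PORT B =====
-- Port of B: sorted(lista_de_string, key=len)[0] — stable sort by length, first element.
def le_string_alt (lista_de_string : List String) : String :=
  PySem.List.pyGetD
    (PySem.List.sorted lista_de_string (fun s => PySem.Str.len s)) 0 ""

-- ===== PRECONDITION & SPEC =====
-- A raises IndexError on the empty list (lista_de_string[0]); B raises IndexError there too.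
def Pre_le_string (lista_de_string : List String) : Prop := lista_de_string ≠ []
instance (lista_de_string : List String) : Decidable (Pre_le_string lista_de_string) := by
  unfold Pre_le_string; infer_instance

def pvWitness_le_string : List String := ["ab", "c", "de"]

def Spec_le_string (lista_de_string : List String) (out : String) : Prop := out = le_string_alt lista_de_string
instance (lista_de_string : List String) (out : String) : Decidable (Spec_le_string lista_de_string out) := by unfold Spec_le_string; infer_instance

-- ===== CLAIM (what is proved, stated in full; the proofs are below) =====
def Claim_equal_le_string : Prop := ∀ (lista_de_string : List String), Dom_le_string lista_de_string → Pre_le_string lista_de_string → Spec_le_string lista_de_string (le_string lista_de_string)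

-- ===== LEMMAS AND PROOFS =====

-- the common value both ports compute: the running "earliest strictly shorter" fold
def pvBest (b : String) (t : List String) : String :=
  t.foldl (fun b x => if PySem.Str.len x < PySem.Str.len b then x else b) b

theorem pvBest_cons (b x : String) (t : List String) :
    pvBest b (x :: t) = pvBest (if PySem.Str.len x < PySem.Str.len b then x else b) t := rfl

-- B side: head of the insertion-sort fold is exactly the pvBest fold
theorem pv_insertBy_head (x a : String) (t : List String) :
    PySem.List.insertBy (fun p q => decide (PySem.Str.len p < PySem.Str.len q)) x (a :: t)
      = if PySem.Str.len x < PySem.Str.len a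
          then x :: a :: t
          else a :: PySem.List.insertBy (fun p q => decide (PySem.Str.len p < PySem.Str.len q)) x t := by
  simp [PySem.List.insertBy]

theorem pv_sort_head : ∀ (t acc : List String) (b : String), acc.head? = some b →
    (t.foldl (fun acc x => PySem.List.insertBy (fun p q => decide (PySem.Str.len p < PySem.Str.len q)) x acc) acc).head?
      = some (pvBest b t) := by
  intro t
  induction t with
  | nil => intro acc b h; simpa [pvBest] using h
  | cons x t ih =>
    intro acc b h
    cases acc with
    | nil => simp at h
    | cons a acc' =>
      have hb : b = a := by simpa using h.symm
      subst hb
      rw [List.foldl_cons, pvBest_cons, pv_insertBy_head]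
      by_cases hx : PySem.Str.len x < PySem.Str.len b
      · simp only [if_pos hx]
        exact ih (x :: b :: acc') x rfl
      · simp only [if_neg hx]
        exact ih (b :: PySem.List.insertBy (fun p q => decide (PySem.Str.len p < PySem.Str.len q)) x acc') b rfl

-- A side: invariant of the index loop, over the suffix xs.drop k
theorem pv_loop_inv : ∀ (n k : Nat) (xs : List String) (p : Int),
    k + n = xs.length →
    (let st :=
      (PySem.List.pyRange (k : Int) ((k : Int) + (n : Int))).foldl
        (fun (st : Int × Int) i =>
          if st.1 > PySem.Str.len (PySem.List.pyGetD xs i "") then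
            (PySem.Str.len (PySem.List.pyGetD xs i ""), i)
          else st)
        (PySem.Str.len (PySem.List.pyGetD xs p ""), p)
     PySem.List.pyGetD xs st.2 "" = pvBest (PySem.List.pyGetD xs p "") (xs.drop k)) := by
  intro n
  induction n with
  | zero =>
    intro k xs p hk
    have hd : xs.drop k = [] := List.drop_of_length_le (by omega)
    simp [PySem.List.pyRange, hd, pvBest]
  | succ n ih =>
    intro k xs p hk
    have hklt : k < xs.length := by omega
    have hcons : PySem.List.pyRange (k : Int) ((k : Int) + ((n : Nat) + 1 : Nat))
        = (k : Int) :: PySem.List.pyRange ((k : Int) + 1) ((k : Int) + ((n : Nat) + 1 : Nat)) :=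
      PySem.List.pyRange_one_cons (by push_cast; omega)
    have hdrop : xs.drop k = xs[k] :: xs.drop (k + 1) := List.drop_eq_getElem_cons hklt
    have hget : PySem.List.pyGetD xs (k : Int) "" = xs[k] := by
      rw [PySem.List.pyGetD_natCast]
      simp [List.getD_eq_getElem?_getD, hklt]
    simp only [hcons, List.foldl_cons]
    have hre : ((k : Int) + ((n : Nat) + 1 : Nat)) = (((k + 1 : Nat) : Int) + (n : Int)) := by push_cast; ring
    by_cases hx : PySem.Str.len (PySem.List.pyGetD xs p "") > PySem.Str.len (PySem.List.pyGetD xs (k : Int) "")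
    · simp only [if_pos hx]
      have := ih (k + 1) xs (k : Int) (by omega)
      rw [hre]
      simp only [Nat.cast_add, Nat.cast_one] at this ⊢
      rw [this, hdrop, pvBest_cons]
      have hx' : PySem.Str.len xs[k] < PySem.Str.len (PySem.List.pyGetD xs p "") := by
        rw [← hget]; exact hx
      rw [if_pos hx', hget]
    · simp only [if_neg hx]
      have := ih (k + 1) xs p (by omega)
      rw [hre]
      simp only [Nat.cast_add, Nat.cast_one] at this ⊢
      rw [this, hdrop, pvBest_cons]
      have hx' : ¬ PySem.Str.len xs[k] < PySem.Str.len (PySem.List.pyGetD xs p "") := by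
        rw [← hget]; exact hx
      rw [if_neg hx']

-- ===== VERDICT (by name: the statement is the Claim_ definition above) =====
theorem le_string_spec : Claim_equal_le_string := by
  intro xs _ hpre
  unfold Spec_le_string le_string le_string_alt
  obtain ⟨x0, t, rfl⟩ : ∃ x0 t, xs = x0 :: t := by
    cases xs with
    | nil => exact absurd rfl hpre
    | cons a l => exact ⟨a, l, rfl⟩
  -- A side
  have hA := pv_loop_inv (x0 :: t).length 0 (x0 :: t) 0 (by omega)
  simp only [Nat.cast_zero, zero_add] at hA
  have hlen : PySem.List.len (x0 :: t) = ((x0 :: t).length : Int) := by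
    simp [PySem.List.len]
  have hget0 : PySem.List.pyGetD (x0 :: t) (0 : Int) "" = x0 := by
    have := PySem.List.pyGetD_natCast (x0 :: t) 0 ""
    simpa using this
  simp only [List.drop_zero, hget0] at hA
  simp only [hlen, hget0]
  rw [hA]
  -- B side
  rw [PySem.List.sorted_eq_foldl_insertBy]
  have hs := pv_sort_head t
      [x0] x0 (by simp)
  have hstep : PySem.List.insertBy (fun p q => decide (PySem.Str.len p < PySem.Str.len q)) x0 ([] : List String) = [x0] := by
    simp [PySem.List.insertBy]
  rw [List.foldl_cons, hstep] at *
  -- pvBest over x0 :: t starts with a no-op step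
  have hb0 : pvBest x0 (x0 :: t) = pvBest x0 t := by
    rw [pvBest_cons, if_neg (lt_irrefl _)]
  rw [hb0]
  obtain ⟨ys, hys⟩ : ∃ ys, (t.foldl (fun acc x => PySem.List.insertBy (fun p q => decide (PySem.Str.len p < PySem.Str.len q)) x acc) [x0]) = ys := ⟨_, rfl⟩
  rw [hys] at hs ⊢
  cases ys with
  | nil => simp at hs
  | cons y ys' =>
    obtain rfl : y = pvBest x0 t := by simpa using hs
    have := PySem.List.pyGetD_natCast (pvBest x0 t :: ys') 0 ""
    simpa using this.symm
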